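-- pv_equiv track=rewrite | github.com/datnnt1997/VPhoBertTagger | tools/word_segment.py | depth_level
-- ===== SOURCE A (Python) =====
-- def depth_level(astring):
--     """
--     E.g.,
--     Tôi là sinh viên -> 0
--     ĐHQG <ENAMEX>Hà Nội</ENAMEX> -> 1
--     Khoa thanh nhạc <ENAMEX>Học viên âm nhạc <ENAMEX>HCM</ENAMEX></ENAMEX> -> 2
--     Args:
--         astring: input string with XML tags
--     Returns:
--         The depth level of a string
--     """
--     level = 0
--     first = True
--     first_add_child = True
--     OPEN_TAG = 1
--     stack = []
--     i = 0
--     while i < len(astring):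
--         if astring[i:].startswith("<ENAMEX TYPE="):
--             if first:
--                 level += 1
--                 first = False
--             if len(stack) > 0:
--                 if first_add_child:
--                     level += 1
--                     first_add_child = False
--             stack.append(OPEN_TAG)
--             i += len("<ENAMEX TYPE=")
--         elif astring[i:].startswith("</ENAMEX>"):
--             stack.pop()
--             i += len("</ENAMEX>")
--         else:
--             i += 1
--     return level
-- ===== SOURCE B (Python) =====
-- def depth_level(astring):
--     # phase 1: extract the ordered ENAMEX tag events (True = open, False = close)
--     events = []
--     s = astring
--     while True:
--         o = s.find("<ENAMEX TYPE=")
--         c = s.find("</ENAMEX>")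
--         if o == -1 and c == -1:
--             break
--         if c == -1 or (o != -1 and o < c):
--             events.append(True)
--             s = s[o + 13:]
--         else:
--             events.append(False)
--             s = s[c + 9:]
--     # phase 2: depth accounting with an explicit stack
--     stack = []
--     maxd = 0
--     for is_open in events:
--         if is_open:
--             stack.append(1)
--             if len(stack) > maxd:
--                 maxd = len(stack)
--         else:
--             stack.pop()
--     return min(maxd, 2)
-- ===== Notes on version B (the rewrite author's own statement) =====
-- stated objective: faster
-- what changed: B replaces A's interleaved per-character scan (which slices astring[i:] and runs startswith at every position, with first/first_add_child flag bookkeeping) by two phases: str.find-based extraction of the ordered tag-event list, then a stack loop tracking the running maximum nesting depth, returning min(maxd, 2).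
-- outside the precondition, e.g. on depth_level('</ENAMEX>'): A raises IndexError, B raises IndexError
import Mathlib
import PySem

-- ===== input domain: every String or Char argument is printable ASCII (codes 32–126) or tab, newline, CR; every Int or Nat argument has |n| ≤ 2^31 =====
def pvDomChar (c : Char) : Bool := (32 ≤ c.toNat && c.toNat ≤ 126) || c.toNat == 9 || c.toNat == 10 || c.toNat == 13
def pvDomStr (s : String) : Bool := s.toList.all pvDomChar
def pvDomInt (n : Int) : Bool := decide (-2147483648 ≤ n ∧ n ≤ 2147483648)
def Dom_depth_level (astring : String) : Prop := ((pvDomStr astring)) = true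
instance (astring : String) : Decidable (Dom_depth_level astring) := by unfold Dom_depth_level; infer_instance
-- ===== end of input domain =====

-- B re-implements depth_level in two phases (find-based tag extraction, then a stack/max loop); same return value,
-- A and B both raise IndexError on an unmatched </ENAMEX> (those inputs are outside Pre_).

def openTok : List Char := "<ENAMEX TYPE=".toList
def closeTok : List Char := "</ENAMEX>".toList

-- ===== PORT A =====
-- A's interleaved character scan; stack.pop() on an empty stack (IndexError) is `none`.
def loopA (cs : List Char) (level : Int) (first fac : Bool) (stack : List Int) : Option Int :=
  match cs with
  | [] => some level
  | c :: rest =>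
    if openTok.isPrefixOf (c :: rest) then
      let level1 := if first then level + 1 else level
      let first1 := if first then false else first
      let level2 := if 0 < stack.length then (if fac then level1 + 1 else level1) else level1
      let fac1   := if 0 < stack.length then (if fac then false else fac) else fac
      loopA ((c :: rest).drop 13) level2 first1 fac1 (stack ++ [1])
    else if closeTok.isPrefixOf (c :: rest) then
      if stack = [] then none  -- stack.pop() raises IndexError
      else loopA ((c :: rest).drop 9) level first fac stack.dropLast
    else loopA rest level first fac stack
termination_by cs.length
decreasing_by all_goals simp

def depth_level (astring : String) : Int :=
  (loopA astring.toList 0 true true []).getD 0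

-- ===== PORT B =====
-- phase 1 of Source B: repeated str.find on the remaining suffix, slicing past each found tag.
def tagEvents (s : List Char) : List Bool :=
  let o := PySem.Chars.find s openTok
  let c := PySem.Chars.find s closeTok
  if h1 : o = -1 ∧ c = -1 then []
  else if h2 : c = -1 ∨ (o ≠ -1 ∧ o < c) then
    true :: tagEvents (s.drop (o.toNat + 13))
  else
    false :: tagEvents (s.drop (c.toNat + 9))
termination_by s.length
decreasing_by
  · have ho : PySem.Chars.find s openTok ≠ -1 := by
      rcases h2 with h2 | h2
      · exact fun h => h1 ⟨h, h2⟩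
      · exact h2.1
    have hinf : openTok <:+: s := (PySem.Chars.find_ne_neg_one_iff s openTok).mp ho
    have hlen := hinf.length_le
    simp [openTok] at hlen
    simp; omega
  · have hc : PySem.Chars.find s closeTok ≠ -1 := by
      intro h
      exact h2 (Or.inl h)
    have hinf : closeTok <:+: s := (PySem.Chars.find_ne_neg_one_iff s closeTok).mp hc
    have hlen := hinf.length_le
    simp [closeTok] at hlen
    simp; omega

-- phase 2 of Source B: explicit stack, running maximum depth; stack.pop() on empty is `none`.
def loopB (ts : List Bool) (stack : List Int) (maxd : Int) : Option Int :=
  match ts with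
  | [] => some (min maxd 2)
  | true :: ts =>
    let stack' := stack ++ [1]
    loopB ts stack' (if maxd < (stack'.length : Int) then (stack'.length : Int) else maxd)
  | false :: ts =>
    if stack = [] then none  -- stack.pop() raises IndexError
    else loopB ts stack.dropLast maxd

def depth_level_alt (astring : String) : Int :=
  (loopB (tagEvents astring.toList) [] 0).getD 0

-- ===== PRECONDITION & SPEC =====
-- Pre_ excludes exactly the strings with an unmatched "</ENAMEX>" (some prefix contains more close
-- tags than open tags), on which A's stack.pop() raises IndexError (B raises there too).
def Pre_depth_level (astring : String) : Prop :=
  ∀ n : Nat, n ≤ astring.toList.length →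
    PySem.Chars.count (astring.toList.take n) closeTok ≤ PySem.Chars.count (astring.toList.take n) openTok
instance (astring : String) : Decidable (Pre_depth_level astring) := by
  unfold Pre_depth_level; infer_instance

def pvWitness_depth_level : String := "<ENAMEX TYPE=a>b</ENAMEX>"

def Spec_depth_level (astring : String) (out : Int) : Prop := out = depth_level_alt astring
instance (astring : String) (out : Int) : Decidable (Spec_depth_level astring out) := by unfold Spec_depth_level; infer_instance

-- ===== CLAIM (what is proved, stated in full; the proofs are below) =====
def Claim_equal_depth_level : Prop := ∀ (astring : String), Dom_depth_level astring → Pre_depth_level astring → Spec_depth_level astring (depth_level astring)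

-- ===== LEMMAS AND PROOFS =====

-- scanTags: the ordered tag events of the string, read off by A's character scan (proof bridge).
def scanTags : List Char → List Bool
  | [] => []
  | c :: rest =>
    if openTok.isPrefixOf (c :: rest) then true :: scanTags ((c :: rest).drop 13)
    else if closeTok.isPrefixOf (c :: rest) then false :: scanTags ((c :: rest).drop 9)
    else scanTags rest
termination_by cs => cs.length
decreasing_by all_goals simp

-- A's per-token action, replayed over the event list (proof-only helper).
def loopE (ts : List Bool) (level : Int) (first fac : Bool) (stack : List Int) : Option Int :=
  match ts with
  | [] => some level
  | true :: ts =>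
    let level1 := if first then level + 1 else level
    let first1 := if first then false else first
    let level2 := if 0 < stack.length then (if fac then level1 + 1 else level1) else level1
    let fac1   := if 0 < stack.length then (if fac then false else fac) else fac
    loopE ts level2 first1 fac1 (stack ++ [1])
  | false :: ts =>
    if stack = [] then none
    else loopE ts level first fac stack.dropLast

theorem loopA_eq_loopE : ∀ (cs : List Char) (l : Int) (f fc : Bool) (st : List Int),
    loopA cs l f fc st = loopE (scanTags cs) l f fc st := by
  intro cs l f fc st
  fun_induction loopA cs l f fc st with
  | case1 => simp [scanTags, loopE]
  | case2 =>
    rename_i h lv1 fs1 lv2 fc1 ih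
    rw [ih]
    simp only [scanTags, h, if_true, loopE]
    rfl
  | case3 =>
    rename_i h1 h2
    simp [scanTags, h1, h2, loopE]
  | case4 =>
    rename_i h1 h2 hst ih
    rw [ih]
    simp [scanTags, h1, h2, loopE, hst]
  | case5 =>
    rename_i h1 h2 ih
    rw [ih]
    simp [scanTags, h1, h2]

theorem find_zero_of_prefix (tok s : List Char) (h : tok <+: s) :
    PySem.Chars.find s tok = 0 := by
  have h0 : 0 ≤ PySem.Chars.find s tok :=
    (PySem.Chars.find_nonneg_iff s tok).mpr h.isInfix
  obtain ⟨h1, h2⟩ := PySem.Chars.find_spec h0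
  by_contra hne
  have hz : 0 < (PySem.Chars.find s tok).toNat := by omega
  have := h2 0 hz
  simp at this
  exact this h

theorem find_step (tok s : List Char) (hnp : ¬ tok <+: s) :
    PySem.Chars.find s tok =
      if PySem.Chars.find (s.drop 1) tok = -1 then -1 else 1 + PySem.Chars.find (s.drop 1) tok := by
  by_cases hinf : tok <:+: s
  · have h0 : 0 ≤ PySem.Chars.find s tok := (PySem.Chars.find_nonneg_iff s tok).mpr hinf
    obtain ⟨hpre, hmin⟩ := PySem.Chars.find_spec h0
    have hj : (PySem.Chars.find s tok).toNat ≠ 0 := by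
      intro h; rw [h] at hpre; simp at hpre; exact hnp hpre
    have hpre' : tok <+: (s.drop 1).drop ((PySem.Chars.find s tok).toNat - 1) := by
      rw [List.drop_drop]
      have he : 1 + ((PySem.Chars.find s tok).toNat - 1) = (PySem.Chars.find s tok).toNat := by omega
      rw [he]; exact hpre
    have hinf' : tok <:+: s.drop 1 :=
      hpre'.isInfix.trans (List.drop_suffix _ _).isInfix
    have h0' : 0 ≤ PySem.Chars.find (s.drop 1) tok := (PySem.Chars.find_nonneg_iff _ tok).mpr hinf'
    obtain ⟨hpre2, hmin2⟩ := PySem.Chars.find_spec h0'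
    have hk1 : ¬ ((PySem.Chars.find (s.drop 1) tok).toNat + 1 < (PySem.Chars.find s tok).toNat) := by
      intro hlt
      apply hmin _ hlt
      have h2 := hpre2
      rw [List.drop_drop] at h2
      rw [show (PySem.Chars.find (s.drop 1) tok).toNat + 1 = 1 + (PySem.Chars.find (s.drop 1) tok).toNat by omega]
      exact h2
    have hk2 : ¬ ((PySem.Chars.find s tok).toNat - 1 < (PySem.Chars.find (s.drop 1) tok).toNat) := by
      intro hlt
      exact hmin2 _ hlt hpre'
    have he : PySem.Chars.find (s.drop 1) tok = PySem.Chars.find s tok - 1 := by omega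
    rw [if_neg (by omega), he]
    omega
  · have h1 : PySem.Chars.find s tok = -1 := (PySem.Chars.find_eq_neg_one_iff s tok).mpr hinf
    have h2 : PySem.Chars.find (s.drop 1) tok = -1 :=
      (PySem.Chars.find_eq_neg_one_iff _ tok).mpr
        (fun hi => hinf (hi.trans (List.drop_suffix _ _).isInfix))
    rw [h1, h2]; simp

theorem tagEvents_unfold (s : List Char) : tagEvents s =
    (if PySem.Chars.find s openTok = -1 ∧ PySem.Chars.find s closeTok = -1 then ([] : List Bool)
     else if PySem.Chars.find s closeTok = -1 ∨
         (PySem.Chars.find s openTok ≠ -1 ∧ PySem.Chars.find s openTok < PySem.Chars.find s closeTok) then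
       true :: tagEvents (s.drop ((PySem.Chars.find s openTok).toNat + 13))
     else
       false :: tagEvents (s.drop ((PySem.Chars.find s closeTok).toNat + 9))) := by
  conv_lhs => rw [tagEvents]
  rfl

theorem find_nil_ne (tok : List Char) (h : tok ≠ []) : PySem.Chars.find [] tok = -1 := by
  rw [PySem.Chars.find_eq_neg_one_iff]
  intro hinf
  have := hinf.length_le
  simp at this
  exact h this

theorem find_ne_zero_of_not_prefix (tok s : List Char) (h : ¬ tok <+: s) :
    PySem.Chars.find s tok ≠ 0 := by
  intro h0
  have h1 := (PySem.Chars.find_spec (s := s) (sub := tok) (by rw [h0])).1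
  rw [h0] at h1
  simp at h1
  exact h h1

theorem tagEvents_eq_scanTags : ∀ (s : List Char), tagEvents s = scanTags s := by
  have key : ∀ (n : Nat) (s : List Char), s.length ≤ n → tagEvents s = scanTags s := by
    intro n
    induction n with
    | zero =>
      intro s hs
      have hnil : s = [] := List.eq_nil_of_length_eq_zero (by omega)
      subst hnil
      rw [tagEvents_unfold, scanTags]
      simp [find_nil_ne openTok (by decide), find_nil_ne closeTok (by decide)]
    | succ n ih =>
      intro s hs
      match s with
      | [] =>
        rw [tagEvents_unfold, scanTags]
        simp [find_nil_ne openTok (by decide), find_nil_ne closeTok (by decide)]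
      | c :: rest =>
        by_cases hop : openTok <+: (c :: rest)
        · have ho : PySem.Chars.find (c :: rest) openTok = 0 := find_zero_of_prefix _ _ hop
          have hcnp : ¬ closeTok <+: (c :: rest) := by
            obtain ⟨t, ht⟩ := hop
            rw [← ht]
            simp [openTok, closeTok, List.cons_prefix_cons]
          have hc0 := find_ne_zero_of_not_prefix _ _ hcnp
          have hcge := PySem.Chars.neg_one_le_find (c :: rest) closeTok
          have hcond2 : PySem.Chars.find (c :: rest) closeTok = -1 ∨
              (PySem.Chars.find (c :: rest) openTok ≠ -1 ∧
               PySem.Chars.find (c :: rest) openTok < PySem.Chars.find (c :: rest) closeTok) := by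
            by_cases hc1 : PySem.Chars.find (c :: rest) closeTok = -1
            · exact Or.inl hc1
            · exact Or.inr ⟨by omega, by omega⟩
          rw [tagEvents_unfold]
          rw [if_neg (by omega), if_pos hcond2]
          rw [scanTags, if_pos (List.isPrefixOf_iff_prefix.mpr hop)]
          rw [ho]
          have hd : ((0:Int).toNat + 13) = 13 := by norm_num
          rw [hd]
          congr 1
          exact ih _ (by simp at hs ⊢; omega)
        · by_cases hcl : closeTok <+: (c :: rest)
          · have hc : PySem.Chars.find (c :: rest) closeTok = 0 := find_zero_of_prefix _ _ hcl
            have ho0 := find_ne_zero_of_not_prefix _ _ hop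
            have hoge := PySem.Chars.neg_one_le_find (c :: rest) openTok
            rw [tagEvents_unfold]
            rw [if_neg (by omega), if_neg (by
              rw [hc]
              rintro (h | ⟨h1, h2⟩)
              · omega
              · omega)]
            rw [scanTags,
              if_neg (by rw [List.isPrefixOf_iff_prefix]; exact hop),
              if_pos (List.isPrefixOf_iff_prefix.mpr hcl)]
            rw [hc]
            have hd : ((0:Int).toNat + 9) = 9 := by norm_num
            rw [hd]
            congr 1
            exact ih _ (by simp at hs ⊢; omega)
          · -- neither token starts here: both sides step to `rest`
            have hso := find_step openTok (c :: rest) hop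
            have hsc := find_step closeTok (c :: rest) hcl
            have hdrop : (c :: rest).drop 1 = rest := by simp
            rw [hdrop] at hso hsc
            have hogem := PySem.Chars.neg_one_le_find rest openTok
            have hcgem := PySem.Chars.neg_one_le_find rest closeTok
            have hscan : scanTags (c :: rest) = scanTags rest := by
              rw [scanTags,
                if_neg (by rw [List.isPrefixOf_iff_prefix]; exact hop),
                if_neg (by rw [List.isPrefixOf_iff_prefix]; exact hcl)]
            rw [hscan, ← ih rest (by simp at hs; omega)]
            by_cases h1 : PySem.Chars.find rest openTok = -1 ∧ PySem.Chars.find rest closeTok = -1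
            · rw [tagEvents_unfold, if_pos (by rw [hso, hsc]; simp [h1.1, h1.2]),
                tagEvents_unfold (s := rest), if_pos h1]
            · by_cases h2 : PySem.Chars.find rest closeTok = -1 ∨
                  (PySem.Chars.find rest openTok ≠ -1 ∧
                   PySem.Chars.find rest openTok < PySem.Chars.find rest closeTok)
              · have hone : PySem.Chars.find rest openTok ≠ -1 := by
                  rcases h2 with h2 | h2
                  · exact fun h => h1 ⟨h, h2⟩
                  · exact h2.1
                have hcs : PySem.Chars.find (c :: rest) openTok = 1 + PySem.Chars.find rest openTok := by
                  rw [hso, if_neg hone]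
                have hcond2' : PySem.Chars.find (c :: rest) closeTok = -1 ∨
                    (PySem.Chars.find (c :: rest) openTok ≠ -1 ∧
                     PySem.Chars.find (c :: rest) openTok < PySem.Chars.find (c :: rest) closeTok) := by
                  rcases h2 with h2 | h2
                  · exact Or.inl (by rw [hsc, if_pos h2])
                  · refine Or.inr ⟨by rw [hcs]; omega, ?_⟩
                    rw [hcs, hsc, if_neg (by omega)]
                    omega
                rw [tagEvents_unfold, if_neg (by rw [hcs]; omega), if_pos hcond2',
                  tagEvents_unfold (s := rest), if_neg h1, if_pos h2]
                congr 1
                rw [hcs]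
                have ht : (1 + PySem.Chars.find rest openTok).toNat + 13
                    = ((PySem.Chars.find rest openTok).toNat + 13) + 1 := by omega
                rw [ht, List.drop_succ_cons]
              · have hcne : PySem.Chars.find rest closeTok ≠ -1 := fun h => h2 (Or.inl h)
                have hcs : PySem.Chars.find (c :: rest) closeTok = 1 + PySem.Chars.find rest closeTok := by
                  rw [hsc, if_neg hcne]
                have hcond2' : ¬ (PySem.Chars.find (c :: rest) closeTok = -1 ∨
                    (PySem.Chars.find (c :: rest) openTok ≠ -1 ∧
                     PySem.Chars.find (c :: rest) openTok < PySem.Chars.find (c :: rest) closeTok)) := by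
                  rintro (h | ⟨ha, hb⟩)
                  · rw [hcs] at h; omega
                  · apply h2
                    right
                    have hone : PySem.Chars.find rest openTok ≠ -1 := by
                      intro h
                      rw [hso, if_pos h] at ha
                      exact ha rfl
                    refine ⟨hone, ?_⟩
                    rw [hso, if_neg hone, hcs] at hb
                    omega
                rw [tagEvents_unfold, if_neg (by rw [hcs]; omega), if_neg hcond2',
                  tagEvents_unfold (s := rest), if_neg h1, if_neg h2]
                congr 1
                rw [hcs]
                have ht : (1 + PySem.Chars.find rest closeTok).toNat + 9
                    = ((PySem.Chars.find rest closeTok).toNat + 9) + 1 := by omega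
                rw [ht, List.drop_succ_cons]
  intro s
  exact key s.length s le_rfl

theorem loopE_eq_loopB : ∀ (ts : List Bool) (st : List Int) (m : Int),
    (st.length : Int) ≤ m →
    loopE ts (min m 2) (decide (m = 0)) (decide (m ≤ 1)) st = loopB ts st m := by
  intro ts
  induction ts with
  | nil => intro st m _; simp [loopE, loopB]
  | cons b ts ih =>
    intro st m hm
    cases b with
    | false =>
      by_cases hst : st = []
      · simp [loopE, loopB, hst]
      · simp only [loopE, loopB, if_neg hst]
        apply ih
        have h1 : st.dropLast.length = st.length - 1 := by simp
        have h2 : 1 ≤ st.length := by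
          cases st with
          | nil => exact absurd rfl hst
          | cons a l => simp
        rw [h1]
        omega
    | true =>
      simp only [loopE, loopB]
      have hlen : (0:Int) ≤ (st.length : Int) := by positivity
      have key := ih (st ++ [1])
        (if m < ((st ++ [1]).length : Int) then ((st ++ [1]).length : Int) else m)
        (by split_ifs with hc <;> omega)
      rw [← key]
      have hl1 : (((st ++ [1]).length : Int)) = (st.length : Int) + 1 := by simp
      by_cases hm0 : m = 0
      · -- then st = []
        have hst : st.length = 0 := by omega
        rw [hl1]
        simp [hm0, hst]
      · by_cases hm1 : m ≤ 1
        · -- m = 1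
          have hm1' : m = 1 := by omega
          by_cases hst : st.length = 0
          · rw [hl1]
            simp [hm1', hst]
          · have hst1 : st.length = 1 := by omega
            rw [hl1]
            simp [hm1', hst1]
        · -- m ≥ 2
          rw [hl1]
          have e1 : min m 2 = 2 := by omega
          have e2 : (decide (m = 0)) = false := by simp [hm0]
          have e3 : (decide (m ≤ 1)) = false := by simp [hm1]
          have e4 : (if m < (st.length : Int) + 1 then (st.length : Int) + 1 else m) = max m ((st.length:Int)+1) := by
            split_ifs with hc <;> omega
          simp only [e1, e2, e3, e4]
          have e5 : min (max m ((st.length:Int)+1)) 2 = 2 := by omega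
          have e6 : (decide (max m ((st.length:Int)+1) = 0)) = false := by
            simp; omega
          have e7 : (decide (max m ((st.length:Int)+1) ≤ 1)) = false := by
            simp; omega
          simp only [e5, e6, e7]
          simp

-- ===== VERDICT (by name: the statement is the Claim_ definition above) =====
theorem depth_level_spec : Claim_equal_depth_level := by
  intro s _ _
  unfold Spec_depth_level depth_level depth_level_alt
  rw [loopA_eq_loopE, tagEvents_eq_scanTags]
  have h := loopE_eq_loopB (scanTags s.toList) [] 0 (by simp)
  norm_num at h
  rw [h]
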